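-- pv_equiv track=rewrite | github.com/ayyanar-7/Task | ForLoop/largestWordLength.py | count
-- ===== SOURCE A (Python) =====
-- def count(sen):
--     count = 0
--     max = 0
--     for i in range(len(sen)):
--         if(sen[i] != " " and sen[i] != "\t" and sen[i] != "\0"):
--             count += 1
--         else:
--             count = 0
--         if(max < count):
--             max = count
--
--     return max
-- ===== SOURCE B (Python) =====
-- import re
--
-- def count(sen):
--     parts = re.split(r'[ \t\x00]', sen)
--     return max((len(p) for p in parts), default=0)
-- ===== Notes on version B (the rewrite author's own statement) =====
-- stated objective: simpler
-- what changed: Replaced the running-counter/running-max character loop with tokenize-then-aggregate: split on exactly the three delimiter characters (space, tab, NUL) via re.split and take the maximum piece length.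
import Mathlib
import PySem

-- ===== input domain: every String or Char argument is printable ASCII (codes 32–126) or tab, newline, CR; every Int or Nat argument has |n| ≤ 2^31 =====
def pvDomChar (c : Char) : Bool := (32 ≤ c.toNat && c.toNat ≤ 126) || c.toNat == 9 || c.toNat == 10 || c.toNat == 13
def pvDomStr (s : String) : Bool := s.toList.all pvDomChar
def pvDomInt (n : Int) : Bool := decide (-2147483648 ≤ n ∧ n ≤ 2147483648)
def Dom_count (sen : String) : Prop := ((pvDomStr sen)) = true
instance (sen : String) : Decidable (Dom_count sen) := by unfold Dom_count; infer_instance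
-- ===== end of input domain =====

-- B splits on exactly {space, tab, NUL} and takes the longest piece, instead of A's running-counter pass; same value, same cost.

-- ===== PORT A =====
-- the for-loop over the characters, carrying (count, max)
def countLoop : List Char → Int → Int → Int
  | [], _, m => m
  | ch :: t, c, m =>
    let c' : Int := if ch ≠ ' ' ∧ ch ≠ '\t' ∧ ch ≠ Char.ofNat 0 then c + 1 else 0
    countLoop t c' (if m < c' then c' else m)

def count (sen : String) : Int := countLoop sen.toList 0 0

-- ===== PORT B =====
def isDelim (ch : Char) : Bool := ch == ' ' || ch == '\t' || ch == Char.ofNat 0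

-- re.split on the single-character class [ \t\x00] (keeps empty pieces)
def splitParts : List Char → List (List Char)
  | [] => [[]]
  | ch :: t =>
    if isDelim ch then [] :: splitParts t
    else
      match splitParts t with
      | p :: ps => (ch :: p) :: ps
      | [] => [[ch]]

-- max(len(p) for p in parts) with default 0
def maxLens : List (List Char) → Int
  | [] => 0
  | p :: ps => max (p.length : Int) (maxLens ps)

def count_alt (sen : String) : Int := maxLens (splitParts sen.toList)

-- ===== PRECONDITION & SPEC =====
def Spec_count (sen : String) (out : Int) : Prop := out = count_alt sen
instance (sen : String) (out : Int) : Decidable (Spec_count sen out) := by unfold Spec_count; infer_instance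

-- ===== CLAIM (what is proved, stated in full; the proofs are below) =====
def Claim_equal_count : Prop := ∀ (sen : String), Dom_count sen → Spec_count sen (count sen)

-- ===== LEMMAS AND PROOFS =====

theorem splitParts_ne_nil (l : List Char) : ∃ p ps, splitParts l = p :: ps := by
  induction l with
  | nil => exact ⟨[], [], rfl⟩
  | cons ch t ih =>
    obtain ⟨p, ps, h⟩ := ih
    by_cases hd : isDelim ch = true
    · exact ⟨[], splitParts t, by simp [splitParts, hd]⟩
    · exact ⟨ch :: p, ps, by simp [splitParts, hd, h]⟩

-- value continued from a running count c through the parts of l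
def partsMax (c : Int) : List (List Char) → Int
  | [] => c
  | p :: ps => max (c + (p.length : Int)) (maxLens ps)

theorem maxLens_nonneg (ps : List (List Char)) : 0 ≤ maxLens ps := by
  induction ps with
  | nil => simp [maxLens]
  | cons p ps ih => simp only [maxLens]; omega

theorem partsMax_zero (ps : List (List Char)) (h : ps ≠ []) : partsMax 0 ps = maxLens ps := by
  cases ps with
  | nil => exact absurd rfl h
  | cons p ps => simp [partsMax, maxLens]

theorem delim_iff (ch : Char) :
    (¬(ch ≠ ' ' ∧ ch ≠ '\t' ∧ ch ≠ Char.ofNat 0)) ↔ isDelim ch = true := by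
  simp [isDelim]; tauto

theorem countLoop_eq (l : List Char) : ∀ (c m : Int), 0 ≤ c → c ≤ m →
    countLoop l c m = max m (partsMax c (splitParts l)) := by
  induction l with
  | nil =>
    intro c m hc hm
    simp [countLoop, splitParts, partsMax, maxLens]
    omega
  | cons ch t ih =>
    intro c m hc hm
    obtain ⟨q, qs, hsp⟩ := splitParts_ne_nil t
    by_cases hd : isDelim ch = true
    · have hnd : ¬(ch ≠ ' ' ∧ ch ≠ '\t' ∧ ch ≠ Char.ofNat 0) := (delim_iff ch).mpr hd
      have h0 : (if m < (0:Int) then (0:Int) else m) = m := by omega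
      simp only [countLoop, if_neg hnd, h0]
      rw [ih 0 m le_rfl (le_trans hc hm)]
      have hz := partsMax_zero (splitParts t) (by rw [hsp]; simp)
      have hn := maxLens_nonneg (splitParts t)
      rw [hz]
      simp only [splitParts, if_pos hd, partsMax, List.length_nil, Int.natCast_zero]
      omega
    · have hnd : (ch ≠ ' ' ∧ ch ≠ '\t' ∧ ch ≠ Char.ofNat 0) := by
        by_contra h; exact hd ((delim_iff ch).mp h)
      simp only [countLoop, if_pos hnd]
      have h1 : (if m < c + 1 then c + 1 else m) = max m (c + 1) := by omega
      rw [h1, ih (c + 1) (max m (c + 1)) (by omega) (by omega)]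
      simp [splitParts, hd, hsp, partsMax]
      omega

-- ===== VERDICT (by name: the statement is the Claim_ definition above) =====
theorem count_spec : Claim_equal_count := by
  intro sen _
  unfold Spec_count count count_alt
  rw [countLoop_eq sen.toList 0 0 le_rfl le_rfl]
  obtain ⟨p, ps, h⟩ := splitParts_ne_nil sen.toList
  rw [partsMax_zero _ (by rw [h]; simp)]
  have := maxLens_nonneg (splitParts sen.toList)
  omega
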